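-- pv_equiv track=rewrite | github.com/Az-Dan/portfolio-2022 | CSUY1134/dsk7781_hw4_q5.py | is_number_of_lowercase_even
-- ===== SOURCE A (Python) =====
-- def is_number_of_lowercase_even(s, low, high):
--     # similar in style to part a, but with some adjustments
--     index = s[low]
--     lowercase_check = index.islower()
--     if low == high:  # stops loop (?) and (hopefully) returns the final verdict (true/false)
--         if lowercase_check:
--             return False  # 1 is not even
--         else:
--             return True  # 0 is technically even!
--     next_term = low + 1
--     recursive_counting = is_number_of_lowercase_even(s, next_term, high)
--     if recursive_counting:
--         return not lowercase_check  # the two functions swap around each other to mimic even counting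
--     elif lowercase_check:
--         return not recursive_counting
--     else:
--         return recursive_counting
-- ===== SOURCE B (Python) =====
-- def is_number_of_lowercase_even(s, low, high):
--     even = True
--     i = low
--     while True:
--         if s[i].islower():
--             even = not even
--         if i == high:
--             return even
--         i += 1
-- ===== Notes on version B (the rewrite author's own statement) =====
-- stated objective: simpler
-- what changed: Replaces the branchy parity-swapping recursion with a single iterative index walk that toggles a parity flag.
import Mathlib
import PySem

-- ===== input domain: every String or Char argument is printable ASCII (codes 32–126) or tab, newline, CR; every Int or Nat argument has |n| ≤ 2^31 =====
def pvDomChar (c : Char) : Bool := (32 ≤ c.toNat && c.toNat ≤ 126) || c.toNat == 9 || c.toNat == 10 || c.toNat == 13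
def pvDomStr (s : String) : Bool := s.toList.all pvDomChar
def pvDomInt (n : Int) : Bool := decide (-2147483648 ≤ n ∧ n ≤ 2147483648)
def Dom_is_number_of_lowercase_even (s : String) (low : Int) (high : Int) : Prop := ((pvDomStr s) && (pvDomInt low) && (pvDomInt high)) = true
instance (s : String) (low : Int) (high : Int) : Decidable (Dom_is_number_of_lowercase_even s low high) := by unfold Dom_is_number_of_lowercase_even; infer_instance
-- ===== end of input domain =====

-- B replaces A's branchy parity-swapping recursion with a plain iterative index walk toggling a
-- parity flag (objective: simpler). Equal return value on all of Pre_; outside Pre_ both Pythons raise.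

-- termination helper used by both ports (a some-result of pyGet? forces the index below the length)
theorem pvGetSomeLt {α : Type} {xs : List α} {i : Int} {c : α}
    (h : PySem.List.pyGet? xs i = some c) : i < (xs.length : Int) := by
  by_contra hge
  have hnone : PySem.List.pyGet? xs i = none := by
    rw [PySem.List.pyGet?_eq_none_iff]
    simp [PySem.Raise.InRange]
    omega
  simp [hnone] at h

-- ===== PORT A =====
def is_number_of_lowercase_even (s : String) (low : Int) (high : Int) : Bool :=
  match h : PySem.Str.pyGet? s low with
  | none => false  -- s[low] raises IndexError in Python; outside Pre_
  | some index =>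
    let lowercase_check := PySem.Chars.islower index
    if low = high then
      if lowercase_check then false else true
    else
      let next_term := low + 1
      let recursive_counting := is_number_of_lowercase_even s next_term high
      if recursive_counting then !lowercase_check
      else if lowercase_check then !recursive_counting
      else recursive_counting
termination_by (s.toList.length - low).toNat
decreasing_by
  have hlt : low < (s.toList.length : Int) := pvGetSomeLt (by simpa using h)
  omega

-- ===== PORT B =====
-- the 'while True' loop of Source B: even is the parity flag, i the walking index
def pvLoopB (s : String) (high : Int) (i : Int) (even : Bool) : Bool :=
  match h : PySem.Str.pyGet? s i with
  | none => even  -- s[i] raises IndexError in Python; outside Pre_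
  | some c =>
    let even := if PySem.Chars.islower c then !even else even
    if i = high then even
    else pvLoopB s high (i + 1) even
termination_by (s.toList.length - i).toNat
decreasing_by
  have hlt : i < (s.toList.length : Int) := pvGetSomeLt (by simpa using h)
  omega

def is_number_of_lowercase_even_alt (s : String) (low : Int) (high : Int) : Bool :=
  pvLoopB s high low true

-- ===== PRECONDITION & SPEC =====
-- Pre_ = exactly the inputs where Python A returns (elsewhere A raises IndexError:
-- immediately if s[low] is out of range, or after recursing past high/off the end).
def Pre_is_number_of_lowercase_even (s : String) (low : Int) (high : Int) : Prop :=
  low ≤ high ∧ -(s.toList.length : Int) ≤ low ∧ high < (s.toList.length : Int)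
instance (s : String) (low : Int) (high : Int) : Decidable (Pre_is_number_of_lowercase_even s low high) := by unfold Pre_is_number_of_lowercase_even; infer_instance

def pvWitness_is_number_of_lowercase_even : String × Int × Int := ("aB", 0, 1)

def Spec_is_number_of_lowercase_even (s : String) (low : Int) (high : Int) (out : Bool) : Prop := out = is_number_of_lowercase_even_alt s low high
instance (s : String) (low : Int) (high : Int) (out : Bool) : Decidable (Spec_is_number_of_lowercase_even s low high out) := by unfold Spec_is_number_of_lowercase_even; infer_instance

-- ===== CLAIM (what is proved, stated in full; the proofs are below) =====
def Claim_equal_is_number_of_lowercase_even : Prop := ∀ (s : String) (low : Int) (high : Int), Dom_is_number_of_lowercase_even s low high → Pre_is_number_of_lowercase_even s low high → Spec_is_number_of_lowercase_even s low high (is_number_of_lowercase_even s low high)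

-- ===== LEMMAS AND PROOFS =====

-- Inside Pre_, every index low..high is in range, so pyGet? returns some.
theorem pvGetSome (s : String) (i : Int)
    (h1 : -(s.toList.length : Int) ≤ i) (h2 : i < (s.toList.length : Int)) :
    ∃ c, PySem.Str.pyGet? s i = some c := by
  have hne : PySem.List.pyGet? s.toList i ≠ none := by
    intro hn
    rw [PySem.List.pyGet?_eq_none_iff] at hn
    simp [PySem.Raise.InRange] at hn
    simp at h1 h2
    omega
  rcases Option.ne_none_iff_exists'.mp hne with ⟨c, hc⟩
  exact ⟨c, by simpa using hc⟩

-- unfolding lemmas for the dependent matches in the two ports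
theorem pvLoopB_some (s : String) (high i : Int) (acc : Bool) (c : Char)
    (hc : PySem.Str.pyGet? s i = some c) :
    pvLoopB s high i acc =
      (if i = high then (if PySem.Chars.islower c then !acc else acc)
       else pvLoopB s high (i + 1) (if PySem.Chars.islower c then !acc else acc)) := by
  rw [pvLoopB]
  split
  · next h => rw [hc] at h; exact absurd h (by simp)
  · next x h =>
      rw [hc] at h
      have hx : c = x := by injection h
      subst hx; rfl

theorem pvA_some (s : String) (low high : Int) (c : Char)
    (hc : PySem.Str.pyGet? s low = some c) :
    is_number_of_lowercase_even s low high =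
      (if low = high then (if PySem.Chars.islower c then false else true)
       else
        if is_number_of_lowercase_even s (low + 1) high then !(PySem.Chars.islower c)
        else if PySem.Chars.islower c then !(is_number_of_lowercase_even s (low + 1) high)
        else is_number_of_lowercase_even s (low + 1) high) := by
  rw [is_number_of_lowercase_even]
  split
  · next h => rw [hc] at h; exact absurd h (by simp)
  · next x h =>
      rw [hc] at h
      have hx : c = x := by injection h
      subst hx; rfl

-- Loop invariant: with all indices low..high in range, B's loop computes acc == A's recursion.
theorem pvLoopB_eq (s : String) (high : Int) :
    ∀ (n : Nat) (low : Int) (acc : Bool), (high - low).toNat = n →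
    -(s.toList.length : Int) ≤ low → low ≤ high → high < (s.toList.length : Int) →
    pvLoopB s high low acc = (acc == is_number_of_lowercase_even s low high) := by
  intro n
  induction n with
  | zero =>
    intro low acc hn h1 h2 h3
    have hlh : low = high := by omega
    rcases pvGetSome s low h1 (by omega) with ⟨c, hc⟩
    rw [pvLoopB_some s high low acc c hc, pvA_some s low high c hc]
    simp only [hlh]
    cases PySem.Chars.islower c <;> cases acc <;> simp
  | succ m ih =>
    intro low acc hn h1 h2 h3
    have hlt : low < high := by omega
    rcases pvGetSome s low h1 (by omega) with ⟨c, hc⟩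
    rw [pvLoopB_some s high low acc c hc, pvA_some s low high c hc]
    simp only [if_neg (by omega : ¬ low = high)]
    have hrec := ih (low + 1) (if PySem.Chars.islower c then !acc else acc)
      (by omega) (by omega) (by omega) h3
    rw [hrec]
    cases PySem.Chars.islower c <;>
      cases is_number_of_lowercase_even s (low + 1) high <;> cases acc <;> simp

-- ===== VERDICT (by name: the statement is the Claim_ definition above) =====
theorem is_number_of_lowercase_even_spec : Claim_equal_is_number_of_lowercase_even := by
  intro s low high _hdom hpre
  rcases hpre with ⟨h2, h1, h3⟩
  unfold Spec_is_number_of_lowercase_even is_number_of_lowercase_even_alt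
  rw [pvLoopB_eq s high (high - low).toNat low true rfl h1 h2 h3]
  cases is_number_of_lowercase_even s low high <;> simp
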